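-- pv_equiv track=rewrite | github.com/TakeTakis/practice-Python | P2/P2E1.py | mayor_col
-- ===== SOURCE A (Python) =====
-- def mayor_col(A):
--     max = 0
--     sum = 0
--     mayor_Colum=''
--     for i in range(len(A[0])):
--         sum = 0
--         for j in range(len(A)):
--             sum += A[j][i]
--         if sum > max:
--             max = sum
--             mayor_Colum=A[0][i]
--     return (mayor_Colum,max)
-- ===== SOURCE B (Python) =====
-- def mayor_col(A):
--     n = len(A[0])
--     sums = [0] * n
--     for row in A:
--         sums = [sums[i] + row[i] for i in range(n)]
--     best = 0
--     col = ''
--     for i in range(n):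
--         if sums[i] > best:
--             best = sums[i]
--             col = A[0][i]
--     return (col, best)
-- ===== Notes on version B (the rewrite author's own statement) =====
-- stated objective: alternative
-- what changed: Replaces A's per-column rescans (outer loop over columns, inner loop re-indexing every row per column) by a table-then-select decomposition: one row-major pass accumulates all column sums into a list, then a single scan of that list picks the first column whose sum strictly exceeds the 0-initialised best.
-- outside the precondition, e.g. on mayor_col([[-1]]): A returns ('', 0), B returns ('', 0)
import Mathlib
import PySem

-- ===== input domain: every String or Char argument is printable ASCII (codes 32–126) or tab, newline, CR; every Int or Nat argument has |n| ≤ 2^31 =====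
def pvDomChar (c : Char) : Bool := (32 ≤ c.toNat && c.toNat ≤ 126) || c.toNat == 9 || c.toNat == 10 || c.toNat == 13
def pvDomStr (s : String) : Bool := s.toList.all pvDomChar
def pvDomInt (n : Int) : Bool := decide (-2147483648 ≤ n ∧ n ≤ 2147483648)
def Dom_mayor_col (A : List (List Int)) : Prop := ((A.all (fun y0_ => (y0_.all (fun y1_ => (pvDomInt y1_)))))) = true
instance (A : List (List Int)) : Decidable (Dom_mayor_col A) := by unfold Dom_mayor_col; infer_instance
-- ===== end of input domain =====

-- B reorganises A's per-column rescans into one row-major accumulation of all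
-- column sums followed by a single selection scan (alternative decomposition,
-- same asymptotic cost). Equivalence is about the return value.

-- ===== PORT A =====
-- A: outer loop over column indices, inner loop re-summing that column over all
-- rows; state (max, mayor_Colum). Python's '' sentinel / IndexError inputs are
-- outside Pre_; the port totalizes them with pyGetD defaults and col sentinel 0.
def mayor_col (A : List (List Int)) : Int × Int :=
  let n : Int := ((PySem.List.pyGetD A 0 []).length : Int)
  let st := (PySem.List.pyRange 0 n 1).foldl (fun (st : Int × Int) i =>
      let s := (PySem.List.pyRange 0 (A.length : Int) 1).foldl
        (fun s j => s + PySem.List.pyGetD (PySem.List.pyGetD A j []) i 0) 0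
      if s > st.1 then (s, PySem.List.pyGetD (PySem.List.pyGetD A 0 []) i 0)
      else st)
    ((0 : Int), (0 : Int))
  (st.2, st.1)

-- ===== PORT B =====
-- B: sums = [0]*n; one pass over the rows rebuilding sums by comprehension;
-- then one scan of sums selecting (col, best).
def mayor_col_alt (A : List (List Int)) : Int × Int :=
  let n : Int := ((PySem.List.pyGetD A 0 []).length : Int)
  let sums := A.foldl
    (fun sums row => (PySem.List.pyRange 0 n 1).map
      (fun i => PySem.List.pyGetD sums i 0 + PySem.List.pyGetD row i 0))
    (List.replicate (PySem.List.pyGetD A 0 []).length (0 : Int))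
  let st := (PySem.List.pyRange 0 n 1).foldl (fun (st : Int × Int) i =>
      if PySem.List.pyGetD sums i 0 > st.1 then
        (PySem.List.pyGetD sums i 0, PySem.List.pyGetD (PySem.List.pyGetD A 0 []) i 0)
      else st)
    ((0 : Int), (0 : Int))
  (st.2, st.1)

-- ===== PRECONDITION & SPEC =====
-- Pre_ excludes the inputs where Python A raises IndexError (empty matrix, or a
-- row shorter than the first row) and the inputs where no column sum is strictly
-- positive, on which A returns ('', 0) — a string, not a value of the declared
-- Int × Int type, so it cannot be claimed under the type convention.
def Pre_mayor_col (A : List (List Int)) : Prop :=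
  A ≠ [] ∧ (∀ row ∈ A, A.headI.length ≤ row.length) ∧
  ∃ i ∈ List.range A.headI.length, 0 < (A.map (fun row => row.getD i 0)).sum
instance (A : List (List Int)) : Decidable (Pre_mayor_col A) := by
  unfold Pre_mayor_col; infer_instance

def pvWitness_mayor_col : List (List Int) := [[1, -2], [3, 4]]

def Spec_mayor_col (A : List (List Int)) (out : Int × Int) : Prop := out = mayor_col_alt A
instance (A : List (List Int)) (out : Int × Int) : Decidable (Spec_mayor_col A out) := by unfold Spec_mayor_col; infer_instance

-- ===== CLAIM (what is proved, stated in full; the proofs are below) =====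
def Claim_equal_mayor_col : Prop := ∀ (A : List (List Int)), Dom_mayor_col A → Pre_mayor_col A → Spec_mayor_col A (mayor_col A)

-- ===== LEMMAS AND PROOFS =====

-- the sum of column i of the rows R (with default 0 past a row's end)
def pvColSum (R : List (List Int)) (i : Int) : Int :=
  R.foldl (fun s row => s + PySem.List.pyGetD row i 0) 0

theorem pvColSum_shift (R : List (List Int)) (i : Int) (c : Int) :
    R.foldl (fun s row => s + PySem.List.pyGetD row i 0) c = c + pvColSum R i := by
  induction R generalizing c with
  | nil => simp [pvColSum]
  | cons r R ih =>
      simp only [pvColSum, List.foldl_cons] at *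
      rw [ih, ih (0 + PySem.List.pyGetD r i 0)]
      ring

theorem pvColSum_cons (r : List Int) (R : List (List Int)) (i : Int) :
    pvColSum (r :: R) i = PySem.List.pyGetD r i 0 + pvColSum R i := by
  simp only [pvColSum, List.foldl_cons]
  rw [pvColSum_shift]
  simp [pvColSum]

-- B's accumulated sums list reads back, at every index of the scanned range,
-- as the initial entry plus the column sum of the processed rows.
theorem pvSums_get (n : Int) (R : List (List Int)) (s0 : List Int) (i : Int)
    (h0 : 0 ≤ i) (hn : i < n) :
    PySem.List.pyGetD
      (R.foldl (fun sums row => (PySem.List.pyRange 0 n 1).map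
        (fun k => PySem.List.pyGetD sums k 0 + PySem.List.pyGetD row k 0)) s0) i 0
      = PySem.List.pyGetD s0 i 0 + pvColSum R i := by
  induction R generalizing s0 with
  | nil => simp [pvColSum]
  | cons r R ih =>
      simp only [List.foldl_cons, pvColSum_cons]
      rw [ih]
      rw [PySem.List.pyGetD_map_pyRange_of_nonneg _ n i 0 h0 hn]
      ring

theorem mayor_col_eq_alt (A : List (List Int)) : mayor_col A = mayor_col_alt A := by
  unfold mayor_col mayor_col_alt
  simp only []
  refine congrArg (fun st : Int × Int => (st.2, st.1))
    (PySem.List.foldl_congr_mem _ _ _ _ ?_)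
  intro st i hi
  have hmem := (PySem.List.mem_pyRange_one).1 hi
  -- A's inner per-column rescan is the column sum
  rw [PySem.List.foldl_pyRange_zero_pyGetD' A ([] : List Int)
        (fun s row => s + PySem.List.pyGetD row i 0) 0]
  -- B's table entry is the same column sum
  rw [pvSums_get _ A _ i hmem.1 hmem.2]
  have : PySem.List.pyGetD (List.replicate (PySem.List.pyGetD A 0 []).length (0 : Int)) i 0 = 0 := by
    rcases Int.eq_ofNat_of_zero_le hmem.1 with ⟨k, rfl⟩
    simp [List.getD]
  rw [this, pvColSum, zero_add]

-- ===== VERDICT (by name: the statement is the Claim_ definition above) =====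
theorem mayor_col_spec : Claim_equal_mayor_col := by
  intro A _ _
  unfold Spec_mayor_col
  exact mayor_col_eq_alt A
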